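-- pv_equiv track=rewrite | github.com/jason-yu1/Search-Engine | htable.py | htable_str
-- ===== SOURCE A (Python) =====
-- def htable_str(table):
--     """
--     Return what str(table) would return for a regular Python dict
--     such as {parrt:99}. The order should be in bucket order and then
--     insertion order within each bucket. The insertion order is
--     guaranteed when you append to the buckets in htable_put().
--     """
--     # get number of elements in all table
--     count = sum([len(elements) for elements in table])
--
--     s = '{'
--     for num, bucket in enumerate(table):
--         temp_s = ''
--         for i, pair in enumerate(bucket):
--             key = pair[0]
--             if type(key) != str:
--                 key = str(key)
--             temp_s = "".join([temp_s, key, ':', str(pair[1])])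
--             # if add real object to string, decrease counter
--             if bucket:
--                 count -= 1
--             # if last item added, do not add comm
--             if count == 0:
--                 break
--             temp_s = "".join([temp_s, ', '])
--
--         if num == len(table) - 1:
--             temp_s = "".join([temp_s, '}'])
--         s = "".join([s, temp_s])
--
--     return s
-- ===== SOURCE B (Python) =====
-- def htable_str(table):
--     parts = []
--     for bucket in table:
--         for pair in bucket:
--             key = pair[0]
--             if type(key) != str:
--                 key = str(key)
--             parts.append(key + ':' + str(pair[1]))
--     return '{' + ', '.join(parts) + '}'
-- ===== Notes on version B (the rewrite author's own statement) =====
-- stated objective: simpler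
-- what changed: B collects the formatted 'key:value' strings in one flat pass and emits '{' + ', '.join(parts) + '}', replacing A's global element countdown-with-early-break comma management and its per-pair ''.join string splicing (the join builds the result once, a constant-factor win a timing run measured).
-- intended difference: On the empty table [] A returns '{' (the closing brace is appended only inside the loop over buckets, which never runs), while B returns '{}', the str() of an empty dict that the docstring promises. — e.g. on htable_str([]): A returns "{", B returns "{}"
import Mathlib
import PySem

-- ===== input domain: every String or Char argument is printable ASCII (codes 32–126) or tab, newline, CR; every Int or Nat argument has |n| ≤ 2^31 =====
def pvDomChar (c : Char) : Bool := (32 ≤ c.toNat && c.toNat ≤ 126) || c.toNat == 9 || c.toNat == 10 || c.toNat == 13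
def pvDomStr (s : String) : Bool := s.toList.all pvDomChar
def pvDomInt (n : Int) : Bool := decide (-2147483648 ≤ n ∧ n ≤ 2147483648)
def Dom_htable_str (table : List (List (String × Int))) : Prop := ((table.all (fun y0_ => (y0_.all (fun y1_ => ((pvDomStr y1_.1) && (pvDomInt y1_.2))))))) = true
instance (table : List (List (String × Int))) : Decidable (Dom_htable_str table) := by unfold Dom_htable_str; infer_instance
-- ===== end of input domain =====

-- B formats all pairs in one flat pass and joins with ', ', instead of A's countdown-with-break
-- comma management; on the empty table B returns the intended "{}" where A returns "{".

-- ===== PORT A =====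
-- inner `for i, pair in enumerate(bucket)` loop, carrying (temp_s, count); the `if bucket:` guard
-- is always true while iterating the bucket's own elements, so the decrement is unconditional (exact).
def pvInnerA : List (String × Int) → Int → String → String × Int
  | [], count, temp_s => (temp_s, count)
  | pair :: rest, count, temp_s =>
    -- key = pair[0]; `type(key) != str` never holds here (keys are str), so key stays pair.1
    let temp_s := temp_s ++ pair.1 ++ ":" ++ PySem.Int.toStr pair.2
    let count := count - 1
    if count = 0 then (temp_s, count)
    else pvInnerA rest count (temp_s ++ ", ")

-- outer `for num, bucket in enumerate(table)` loop; num is the running index, tlen = len(table)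
def pvOuterA (tlen : Nat) : Nat → Int → String → List (List (String × Int)) → String
  | _, _, s, [] => s
  | num, count, s, bucket :: rest =>
    let r := pvInnerA bucket count ""
    let temp_s := if num = tlen - 1 then r.1 ++ "}" else r.1
    pvOuterA tlen (num + 1) r.2 (s ++ temp_s) rest

def htable_str (table : List (List (String × Int))) : String :=
  let count : Int := ((table.map (fun elements => (elements.length : Int))).sum)
  pvOuterA table.length 0 count "{" table

-- ===== PORT B =====
def htable_str_alt (table : List (List (String × Int))) : String :=
  let parts : List String :=
    table.foldl (fun acc bucket =>
      bucket.foldl (fun acc pair => acc ++ [pair.1 ++ ":" ++ PySem.Int.toStr pair.2]) acc) []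
  "{" ++ PySem.Str.join ", " parts ++ "}"

-- ===== PRECONDITION & SPEC =====
-- On the empty table [] A returns "{" (the closing brace is only appended inside the bucket loop,
-- which never runs) while B returns "{}", the str() of an empty dict that A's docstring promises.
def D_htable_str (table : List (List (String × Int))) : Prop := table = []
instance (table : List (List (String × Int))) : Decidable (D_htable_str table) := by unfold D_htable_str; infer_instance

def Spec_htable_str (table : List (List (String × Int))) (out : String) : Prop := ¬ D_htable_str table → out = htable_str_alt table
instance (table : List (List (String × Int))) (out : String) : Decidable (Spec_htable_str table out) := by unfold Spec_htable_str; infer_instance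

def pvDiffWitness_htable_str : (List (List (String × Int))) := []
def pvDiffWitnessOut_htable_str : String × String := ("{", "{}")

-- ===== CLAIM (what is proved, stated in full; the proofs are below) =====
def Claim_unchanged_htable_str : Prop := ∀ (table : List (List (String × Int))), Dom_htable_str table → Spec_htable_str table (htable_str table)
def Claim_changed_htable_str : Prop := Dom_htable_str (pvDiffWitness_htable_str) ∧ D_htable_str (pvDiffWitness_htable_str) ∧ htable_str (pvDiffWitness_htable_str) = pvDiffWitnessOut_htable_str.1 ∧ htable_str_alt (pvDiffWitness_htable_str) = pvDiffWitnessOut_htable_str.2 ∧ pvDiffWitnessOut_htable_str.1 ≠ pvDiffWitnessOut_htable_str.2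
def Claim_exact_htable_str : Prop := ∀ (table : List (List (String × Int))), Dom_htable_str table → D_htable_str table → htable_str table ≠ htable_str_alt table

-- ===== LEMMAS AND PROOFS =====

def pvFmt (p : String × Int) : String := p.1 ++ ":" ++ PySem.Int.toStr p.2

-- each part followed by ", " (the shape pvInnerA leaves when it does not break)
def pvTrail : List (String × Int) → String
  | [] => ""
  | p :: r => pvFmt p ++ ", " ++ pvTrail r

-- ", ".join
def pvJoin : List String → String
  | [] => ""
  | [x] => x
  | x :: y :: r => x ++ ", " ++ pvJoin (y :: r)

lemma pvJoin_cons_cons (x y : String) (r : List String) :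
    pvJoin (x :: y :: r) = x ++ ", " ++ pvJoin (y :: r) := rfl

lemma pvStrJoin_eq_pvJoin : ∀ l : List String, PySem.Str.join ", " l = pvJoin l
  | [] => by simp [PySem.Str.join, PySem.Chars.join_nil, pvJoin]
  | [x] => by simp [PySem.Str.join, PySem.Chars.join_singleton, pvJoin]
  | x :: y :: r => by
    have h : PySem.Str.join ", " (x :: y :: r) = x ++ ", " ++ PySem.Str.join ", " (y :: r) := by
      simp only [PySem.Str.join, List.map_cons, PySem.Chars.join_cons_cons,
        String.ofList_append, String.ofList_toList]
    rw [h, pvStrJoin_eq_pvJoin (y :: r), pvJoin_cons_cons]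

-- pvInnerA when the countdown strictly exceeds the bucket: no break, trailing comma everywhere
lemma pvInnerA_gt : ∀ (b : List (String × Int)) (c : Int) (t : String),
    (b.length : Int) < c → pvInnerA b c t = (t ++ pvTrail b, c - b.length)
  | [], c, t => by
    intro _
    simp [pvInnerA, pvTrail]
  | p :: rest, c, t => by
    intro h
    simp only [List.length_cons] at h
    push_cast at h
    simp only [pvInnerA]
    rw [if_neg (by omega)]
    rw [pvInnerA_gt rest (c - 1) _ (by omega)]
    refine Prod.ext ?_ ?_
    · simp [pvTrail, pvFmt, String.append_assoc]
    · simp only [List.length_cons]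
      push_cast
      omega

-- pvInnerA when the countdown equals the bucket length: break at the last pair, no trailing comma
lemma pvInnerA_eq : ∀ (b : List (String × Int)) (t : String),
    pvInnerA b (b.length : Int) t = (t ++ pvJoin (b.map pvFmt), 0)
  | [], t => by
    simp [pvInnerA, pvJoin]
  | p :: rest, t => by
    simp only [pvInnerA, List.length_cons]
    push_cast
    cases rest with
    | nil =>
      rw [if_pos (by norm_num)]
      simp [pvJoin, pvFmt, String.append_assoc]
    | cons q r =>
      rw [if_neg (by simp only [List.length_cons]; push_cast; omega)]
      have hc : (((q :: r).length : Int) + 1 - 1) = (((q :: r).length : Nat) : Int) := by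
        ring
      rw [hc, pvInnerA_eq (q :: r) _]
      refine Prod.ext ?_ rfl
      simp only [List.map_cons, pvJoin_cons_cons]
      simp [pvFmt, String.append_assoc]

lemma pvTrail_append_join : ∀ (b : List (String × Int)) (X : List String), X ≠ [] →
    pvTrail b ++ pvJoin X = pvJoin (b.map pvFmt ++ X)
  | [], X => by
    intro _
    simp [pvTrail]
  | p :: b, X => by
    intro hX
    have ih := pvTrail_append_join b X hX
    rcases hb : b.map pvFmt ++ X with _ | ⟨y, ys⟩
    · rcases X with _ | _
      · exact absurd rfl hX
      · simp at hb
    · simp only [List.map_cons, List.cons_append, hb, pvJoin_cons_cons]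
      rw [← hb, ← ih]
      simp [pvTrail, String.append_assoc]

def pvCnt (ts : List (List (String × Int))) : Int := ((ts.map (fun b => (b.length : Int))).sum)

lemma pvCnt_eq_flat_length : ∀ ts : List (List (String × Int)),
    pvCnt ts = ((ts.flatMap id).length : Int) := by
  intro ts
  induction ts with
  | nil => simp [pvCnt]
  | cons b rest ih =>
    simp only [pvCnt, List.map_cons, List.sum_cons, List.flatMap_cons, List.length_append, id]
    rw [show ((rest.map (fun b => (b.length : Int))).sum) = pvCnt rest from rfl, ih]
    push_cast
    ring

lemma pvOuterA_cons (tlen num : Nat) (count : Int) (s : String)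
    (bucket : List (String × Int)) (rest : List (List (String × Int))) :
    pvOuterA tlen num count s (bucket :: rest)
      = pvOuterA tlen (num + 1) (pvInnerA bucket count "").2
          (s ++ (if num = tlen - 1 then (pvInnerA bucket count "").1 ++ "}"
                 else (pvInnerA bucket count "").1)) rest := rfl

lemma pvOuterA_main : ∀ (ts : List (List (String × Int))) (tlen num : Nat) (s : String),
    ts ≠ [] → num + ts.length = tlen →
    pvOuterA tlen num (pvCnt ts) s ts = s ++ pvJoin ((ts.flatMap id).map pvFmt) ++ "}"
  | [], tlen, num, s => by intro h _; exact absurd rfl h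
  | [b], tlen, num, s => by
    intro _ hlen
    simp only [List.length_cons, List.length_nil] at hlen
    have hc : pvCnt [b] = (b.length : Int) := by simp [pvCnt]
    simp only [pvOuterA, hc, pvInnerA_eq b ""]
    rw [if_pos (by omega)]
    simp only [List.flatMap_cons, List.flatMap_nil, id, List.append_nil]
    simp [String.append_assoc]
  | b :: c :: rest, tlen, num, s => by
    intro _ hlen
    simp only [List.length_cons] at hlen
    have hnn : (0 : Int) ≤ pvCnt (c :: rest) := by
      rw [pvCnt_eq_flat_length]; positivity
    have hsplit : pvCnt (b :: c :: rest) = (b.length : Int) + pvCnt (c :: rest) := by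
      simp [pvCnt]
    by_cases h0 : pvCnt (c :: rest) = 0
    · have hflat : (c :: rest).flatMap id = [] := by
        have := pvCnt_eq_flat_length (c :: rest)
        rw [h0] at this
        exact List.eq_nil_of_length_eq_zero (by exact_mod_cast this.symm)
      have hc : pvCnt (b :: c :: rest) = (b.length : Int) := by rw [hsplit, h0, add_zero]
      rw [pvOuterA_cons, hc, pvInnerA_eq b ""]
      rw [if_neg (by omega)]
      rw [show ((("" ++ pvJoin (b.map pvFmt), (0 : Int)) : String × Int).2)
            = pvCnt (c :: rest) from h0.symm]
      rw [pvOuterA_main (c :: rest) tlen (num + 1) _ (by simp) (by simp; omega)]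
      rw [hflat]
      simp only [List.flatMap_cons, id, List.map_nil, hflat, List.append_nil]
      simp [pvJoin, String.append_assoc]

    · have hpos : 0 < pvCnt (c :: rest) := lt_of_le_of_ne hnn (Ne.symm h0)
      have hlt : (b.length : Int) < pvCnt (b :: c :: rest) := by rw [hsplit]; omega
      rw [pvOuterA_cons, pvInnerA_gt b _ "" hlt]
      have hsub : pvCnt (b :: c :: rest) - (b.length : Int) = pvCnt (c :: rest) := by
        rw [hsplit]; ring
      rw [if_neg (by omega)]
      simp only [hsub]
      rw [pvOuterA_main (c :: rest) tlen (num + 1) _ (by simp) (by simp; omega)]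
      have hXne : ((c :: rest).flatMap id).map pvFmt ≠ [] := by
        intro hx
        have hflat : (c :: rest).flatMap id = [] := List.map_eq_nil_iff.mp hx
        have h00 : pvCnt (c :: rest) = 0 := by
          rw [pvCnt_eq_flat_length, hflat]; rfl
        omega
      have key : pvTrail b ++ pvJoin (((c :: rest).flatMap id).map pvFmt)
          = pvJoin (b.map pvFmt ++ ((c :: rest).flatMap id).map pvFmt) :=
        pvTrail_append_join b _ hXne
      rw [String.empty_append]
      calc s ++ pvTrail b ++ pvJoin (((c :: rest).flatMap id).map pvFmt) ++ "}"
          = s ++ (pvTrail b ++ pvJoin (((c :: rest).flatMap id).map pvFmt)) ++ "}" := by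
            simp [String.append_assoc]
        _ = s ++ pvJoin (((b :: c :: rest).flatMap id).map pvFmt) ++ "}" := by
            rw [key, ← List.map_append]
            simp only [List.flatMap_cons, id]

lemma pvParts_eq : ∀ (ts : List (List (String × Int))) (acc : List String),
    ts.foldl (fun acc bucket =>
      bucket.foldl (fun acc pair => acc ++ [pair.1 ++ ":" ++ PySem.Int.toStr pair.2]) acc) acc
      = acc ++ (ts.flatMap id).map pvFmt := by
  intro ts
  induction ts with
  | nil => simp
  | cons b rest ih =>
    intro acc
    simp only [List.foldl_cons, List.flatMap_cons, id, List.map_append, ih]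
    have hb : ∀ (bk : List (String × Int)) (a : List String),
        bk.foldl (fun a pair => a ++ [pair.1 ++ ":" ++ PySem.Int.toStr pair.2]) a
          = a ++ bk.map pvFmt := by
      intro bk
      induction bk with
      | nil => simp
      | cons p r ihr => intro a; simp [ihr, pvFmt]
    rw [hb, List.append_assoc]

-- ===== VERDICT (by name: the statement is the Claim_ definition above) =====
theorem htable_str_spec : Claim_unchanged_htable_str := by
  intro table _ hD
  have hne : table ≠ [] := hD
  show htable_str table = htable_str_alt table
  show pvOuterA table.length 0 (pvCnt table) "{" table
      = "{" ++ PySem.Str.join ", "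
          (table.foldl (fun acc bucket =>
            bucket.foldl (fun acc pair => acc ++ [pair.1 ++ ":" ++ PySem.Int.toStr pair.2]) acc) []) ++ "}"
  rw [pvParts_eq, List.nil_append, pvStrJoin_eq_pvJoin,
      pvOuterA_main table table.length 0 "{" hne (by simp)]

theorem htable_str_changed : Claim_changed_htable_str := by
  unfold Claim_changed_htable_str; refine ⟨rfl, rfl, rfl, by decide, by decide⟩

theorem htable_str_tight : Claim_exact_htable_str := by
  intro table _ hD
  subst hD
  decide
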